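-- pv_equiv track=rewrite | github.com/AshtonGray/2021-Spring-Artificial-Intelligence | test.py | num_single_locs
-- ===== SOURCE A (Python) =====
-- def num_single_locs(rows):
--     dict = {}
--     totalcount = 0;
--
--     for tuple in rows:
--         if tuple[2] not in dict.keys():
--             dict[tuple[2]] = 1
--         else:
--             dict[tuple[2]] += 1
--
--     # add values and counts into dictionary
--     for value in dict.values():  # go through the dictionary values
--         if value == 1:
--             totalcount += 1
--
--     return int(totalcount)  # fix this line to return an int
-- ===== SOURCE B (Python) =====
-- def num_single_locs(rows):
--     vs = sorted(row[2] for row in rows)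
--     total = 0
--     i = 0
--     n = len(vs)
--     while i < n:
--         j = i + 1
--         while j < n and vs[j] == vs[i]:
--             j += 1
--         if j == i + 1:
--             total += 1
--         i = j
--     return total
-- ===== Notes on version B (the rewrite author's own statement) =====
-- stated objective: alternative
-- what changed: Replaces A's occurrence-count dictionary plus a second pass over its values with a sort of the third-column values followed by a single run-length scan of the sorted list, counting runs of length 1.
import Mathlib
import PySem

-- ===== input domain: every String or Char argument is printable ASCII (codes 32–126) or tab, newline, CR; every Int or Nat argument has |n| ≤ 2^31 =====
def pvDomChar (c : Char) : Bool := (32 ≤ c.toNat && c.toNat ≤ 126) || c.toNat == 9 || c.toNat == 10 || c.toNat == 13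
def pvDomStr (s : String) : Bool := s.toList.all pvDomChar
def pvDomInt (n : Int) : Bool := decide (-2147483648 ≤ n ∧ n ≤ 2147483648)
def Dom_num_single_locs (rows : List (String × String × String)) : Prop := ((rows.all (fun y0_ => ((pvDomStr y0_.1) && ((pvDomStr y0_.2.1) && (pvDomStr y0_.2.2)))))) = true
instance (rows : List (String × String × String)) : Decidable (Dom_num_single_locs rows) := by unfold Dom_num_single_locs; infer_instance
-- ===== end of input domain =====

-- B replaces A's count-dictionary plus second pass over the counts with a sort of the
-- third-column values followed by a run-length scan counting runs of length 1; objective: alternative.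

-- ===== PORT A =====
-- literal port of A: build the count dict, then count the values equal to 1
def num_single_locs (rows : List (String × String × String)) : Int :=
  let d : PySem.Dict String Int := rows.foldl
    (fun d t =>
      if ¬ (d.contains t.2.2 = true) then d.insert t.2.2 1
      else d.insert t.2.2 (d.getD t.2.2 0 + 1))
    PySem.Dict.empty
  d.values.foldl (fun acc v => if v == 1 then acc + 1 else acc) 0

-- ===== PORT B =====
-- the outer while loop of Source B: consume one run of equal values per step
-- (the inner while 'j += 1 while vs[j] == vs[i]' is the takeWhile/dropWhile split;
--  'if j == i + 1' is 'run is empty')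
def pvCountRuns : List String → Int
  | [] => 0
  | v :: rest =>
    let run := rest.takeWhile (fun x => x == v)
    let rest' := rest.dropWhile (fun x => x == v)
    (if run.length = 0 then 1 else 0) + pvCountRuns rest'
termination_by l => l.length
decreasing_by
  have := List.length_dropWhile_le (p := fun x => x == v) (l := rest)
  simp only [List.length_cons]; omega

-- literal port of Source B: sort the third components, then scan the runs
def num_single_locs_alt (rows : List (String × String × String)) : Int :=
  let vs := PySem.List.sorted (rows.map (fun t => t.2.2)) (fun x => x) false
  pvCountRuns vs

-- ===== PRECONDITION & SPEC =====
def Spec_num_single_locs (rows : List (String × String × String)) (out : Int) : Prop := out = num_single_locs_alt rows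
instance (rows : List (String × String × String)) (out : Int) : Decidable (Spec_num_single_locs rows out) := by unfold Spec_num_single_locs; infer_instance

-- ===== CLAIM (what is proved, stated in full; the proofs are below) =====
def Claim_equal_num_single_locs : Prop := ∀ (rows : List (String × String × String)), Dom_num_single_locs rows → Spec_num_single_locs rows (num_single_locs rows)

-- ===== LEMMAS AND PROOFS =====

lemma getD_zero_of_not_contains (d : PySem.Dict String Int) (x : String)
    (h : d.contains x = false) : d.getD x 0 = 0 := by
  simp only [PySem.Dict.contains, List.any_eq_false] at h
  simp only [PySem.Dict.getD, PySem.Dict.get?, List.find?_eq_none.mpr h, Option.getD_none,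
    Option.map_none]

-- A's dict-building loop is Counter(values)
lemma foldA_eq_counter (rows : List (String × String × String)) :
    rows.foldl
      (fun d t =>
        if ¬ (d.contains t.2.2 = true) then d.insert t.2.2 1
        else d.insert t.2.2 (d.getD t.2.2 0 + 1))
      PySem.Dict.empty
      = PySem.Dict.counter (rows.map (fun t => t.2.2)) := by
  rw [← PySem.Dict.foldl_insert_getD_add_one_eq_counter, List.foldl_map]
  apply PySem.List.foldl_congr_mem
  intro d t _
  by_cases hc : d.contains t.2.2 = true
  · simp [hc]
  · rw [getD_zero_of_not_contains d t.2.2 (by simpa using hc)]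
    simp [hc]

-- A counts, over the distinct values, those appearing exactly once
lemma num_single_locs_eq_countP (rows : List (String × String × String)) :
    num_single_locs rows
      = ((PySem.Set.ofList (rows.map (fun t => t.2.2))).countP
          (fun k => (((rows.map (fun t => t.2.2)).count k : Int) == 1)) : Int) := by
  unfold num_single_locs
  rw [foldA_eq_counter]
  rw [PySem.List.foldl_count_if (fun v => v == 1)]
  rw [PySem.Dict.values_eq_map_keys _ (PySem.Dict.nodup_keys_counter _) 0]
  simp only [PySem.Dict.keys_counter, PySem.Dict.getD_counter, List.countP_map]
  rw [zero_add]
  rfl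

-- counting the once-values over the DISTINCT list equals counting them over the list itself
-- (a value with count 1 occupies exactly one position)
lemma countP_ofList_once (l : List String) :
    (PySem.Set.ofList l).countP (fun k => ((l.count k : Int) == 1))
      = l.countP (fun k => ((l.count k : Int) == 1)) := by
  set p : String → Bool := fun k => ((l.count k : Int) == 1) with hp
  have hcount1 : ∀ x, p x = true → l.count x = 1 := by
    intro x hx
    simp only [hp, beq_iff_eq] at hx
    exact_mod_cast hx
  have hnodup_l : (l.filter p).Nodup := by
    rw [List.nodup_iff_count_le_one]
    intro x
    by_cases hx : p x = true
    · rw [List.count_filter hx, hcount1 x hx]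
    · have : x ∉ l.filter p := by
        intro hmem
        exact hx (List.of_mem_filter hmem)
      rw [List.count_eq_zero.mpr this]
      omega
  have hnodup_s : ((PySem.Set.ofList l).filter p).Nodup :=
    (PySem.Set.nodup_ofList l).filter p
  have hmem : ∀ x, x ∈ (PySem.Set.ofList l).filter p ↔ x ∈ l.filter p := by
    intro x
    simp only [List.mem_filter, PySem.Set.mem_ofList]
  have hperm : ((PySem.Set.ofList l).filter p).Perm (l.filter p) :=
    (List.perm_ext_iff_of_nodup hnodup_s hnodup_l).mpr hmem
  rw [List.countP_eq_length_filter, List.countP_eq_length_filter, hperm.length_eq]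

-- all elements of the dropped suffix of a sorted list differ from the head value
lemma dropWhile_ne_head (v : String) (rest : List String)
    (hp : (v :: rest).Pairwise (fun a b => a ≤ b)) :
    ∀ x ∈ rest.dropWhile (fun x => x == v), x ≠ v := by
  rcases List.pairwise_cons.mp hp with ⟨hv, hrest⟩
  cases hd : rest.dropWhile (fun x => x == v) with
  | nil => intro x hx; simp at hx
  | cons h t =>
    have hh : (h == v) = false := by
      have := List.head?_dropWhile_not (p := fun x => x == v) (l := rest)
      rw [hd] at this; simpa using this
    have hhne : h ≠ v := by simpa using hh
    have hsub : (h :: t).Sublist rest := hd ▸ List.dropWhile_sublist _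
    have hpt : (h :: t).Pairwise (fun a b => a ≤ b) := hrest.sublist hsub
    have hvh : v ≤ h := hv h (hsub.mem (by simp))
    intro x hx
    rcases List.mem_cons.mp hx with rfl | hxt
    · exact hhne
    · have hhx : h ≤ x := (List.pairwise_cons.mp hpt).1 x hxt
      intro rfl
      exact hhne (le_antisymm hhx hvh)

-- the run-length scan on a sorted list counts the values occurring exactly once
-- (strong induction on the length bound n, since each step consumes a whole run)
lemma pvCountRuns_sorted_aux (n : Nat) : ∀ (l : List String), l.length ≤ n →
    l.Pairwise (fun a b => a ≤ b) →
    pvCountRuns l = (l.countP (fun k => ((l.count k : Int) == 1)) : Int) := by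
  induction n with
  | zero =>
    intro l hl _
    have : l = [] := List.length_eq_zero_iff.mp (Nat.le_zero.mp hl)
    subst this; simp [pvCountRuns]
  | succ n ih =>
    intro l hl hp
    cases l with
    | nil => simp [pvCountRuns]
    | cons v rest =>
      rw [pvCountRuns]
      set run := rest.takeWhile (fun x => x == v) with hrundef
      set rest' := rest.dropWhile (fun x => x == v) with hrestdef
      have hsplit : run ++ rest' = rest := List.takeWhile_append_dropWhile
      have hrunv : ∀ x ∈ run, x = v := by
        intro x hx
        have := List.mem_takeWhile_imp (hrundef ▸ hx)
        simpa using this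
      have hne : ∀ x ∈ rest', x ≠ v := dropWhile_ne_head v rest hp
      have hp' : rest'.Pairwise (fun a b => a ≤ b) :=
        ((List.pairwise_cons.mp hp).2).sublist (List.dropWhile_sublist _)
      have hlen' : rest'.length ≤ n := by
        have h1 : rest'.length ≤ rest.length := by
          rw [hrestdef]
          exact List.length_dropWhile_le (p := fun x => x == v) (l := rest)
        simp only [List.length_cons] at hl
        omega
      -- counts in l = v :: run ++ rest'
      have hcount_run_v : run.count v = run.length := by
        rw [List.count_eq_length]
        intro x hx
        simp [hrunv x hx]
      have hcount_rest'_v : rest'.count v = 0 := by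
        rw [List.count_eq_zero]
        intro hv; exact hne v hv rfl
      have hl2 : v :: rest = v :: (run ++ rest') := by rw [hsplit]
      have hcv : (v :: rest).count v = 1 + run.length := by
        rw [hl2, List.count_cons_self, List.count_append, hcount_run_v, hcount_rest'_v]
        omega
      have hcx : ∀ x ∈ rest', (v :: rest).count x = rest'.count x := by
        intro x hx
        have hxv : x ≠ v := hne x hx
        have hcrun : run.count x = 0 := by
          rw [List.count_eq_zero]
          intro hxr; exact hxv (hrunv x hxr)
        rw [hl2, List.count_cons, List.count_append, hcrun]
        have h1 : ¬ (v = x) := fun h => hxv h.symm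
        simp [h1]
      -- the countP over l
      set p : String → Bool := fun k => (((v :: rest).count k : Int) == 1) with hpdef
      have hpv : p v = (if run.length = 0 then true else false) := by
        simp only [hpdef, hcv]
        by_cases h0 : run.length = 0
        · simp [h0]
        · have : ¬ ((1 + run.length : Int) = 1) := by omega
          simp [h0, this]
      have hcp_run : run.countP p = 0 := by
        rw [List.countP_eq_zero]
        intro x hx
        rw [hrunv x hx, hpv]
        have : run.length ≠ 0 := by
          intro h0; rw [List.length_eq_zero_iff] at h0; simp [h0] at hx
        simp [this]
      have hcp_rest' : rest'.countP p
          = rest'.countP (fun k => ((rest'.count k : Int) == 1)) := by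
        apply List.countP_congr
        intro x hx
        simp only [hpdef, hcx x hx]
      have hcountP : (v :: rest).countP p
          = (if run.length = 0 then 1 else 0)
              + rest'.countP (fun k => ((rest'.count k : Int) == 1)) := by
        rw [hl2, List.countP_cons, List.countP_append, hcp_run, hcp_rest', hpv]
        by_cases h0 : run.length = 0 <;> simp [h0] <;> omega
      rw [ih rest' hlen' hp']
      simp only [hpdef] at hcountP
      rw [hcountP]
      by_cases h0 : run.length = 0 <;> simp [h0]

lemma pvCountRuns_sorted (l : List String)
    (hp : l.Pairwise (fun a b => a ≤ b)) :
    pvCountRuns l = (l.countP (fun k => ((l.count k : Int) == 1)) : Int) :=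
  pvCountRuns_sorted_aux l.length l le_rfl hp

-- B equals the same countP expression as A
lemma num_single_locs_alt_eq_countP (rows : List (String × String × String)) :
    num_single_locs_alt rows
      = ((PySem.Set.ofList (rows.map (fun t => t.2.2))).countP
          (fun k => (((rows.map (fun t => t.2.2)).count k : Int) == 1)) : Int) := by
  unfold num_single_locs_alt
  set vs := rows.map (fun t => t.2.2) with hvs
  set s := PySem.List.sorted vs (fun x => x) false with hs
  have hperm : s.Perm vs := PySem.List.sorted_perm vs (fun x => x) false
  have hpair : s.Pairwise (fun a b => a ≤ b) := by
    have := PySem.List.sorted_pairwise vs (fun x => x)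
    simpa using this
  rw [pvCountRuns_sorted s hpair]
  have h1 : s.countP (fun k => ((s.count k : Int) == 1))
      = s.countP (fun k => ((vs.count k : Int) == 1)) := by
    apply List.countP_congr
    intro x _
    rw [hperm.count_eq]
  have h2 : s.countP (fun k => ((vs.count k : Int) == 1))
      = vs.countP (fun k => ((vs.count k : Int) == 1)) :=
    hperm.countP_eq _
  rw [h1, h2, countP_ofList_once]

-- ===== VERDICT (by name: the statement is the Claim_ definition above) =====
theorem num_single_locs_spec : Claim_equal_num_single_locs := by
  intro rows _
  unfold Spec_num_single_locs
  rw [num_single_locs_eq_countP, num_single_locs_alt_eq_countP]
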